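-- pv_equiv track=rewrite | github.com/jh0905/data_structure_and_algorithm | jianzhi_offer/58_n个骰子的点数.py | numberOfDice
-- ===== SOURCE A (Python) =====
-- def numberOfDice(n):
--     """
--     :type n: int
--     :rtype: List[int]
--     """
--     if not n:
--         return 0
--     dp = [[0] * (6 * n + 1) for _ in range(0, n + 1)]  # 创建一个(n+1)* 6n 的二维矩阵
--     for i in range(1, 7):  # 边界处理，1个骰子和的取值为1,2,3,4,5,6的情况数全为1
--         dp[1][i] = 1
--     for i in range(2, n + 1):  # 枚举骰子个数，从2开始
--         for j in range(i, 6 * i + 1):  # 枚举i个骰子和的取值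
--             for k in range(1, 7):  # i个骰子和为j的总情况数，等于i-1个骰子和为j-1,j-2,...总情况数之和
--                 dp[i][j] += dp[i - 1][j - k]
--     return dp[-1][n:]  # 最后一层，从第n个元素开始，即为所求
-- ===== SOURCE B (Python) =====
-- def numberOfDice(n):
--     """
--     :type n: int
--     :rtype: List[int]
--     """
--     if not n:
--         return 0
--     # closed-form inclusion-exclusion: ways(s) = sum_k (-1)^k C(n,k) C(s-6k-1, n-1)
--     # binomial coefficients C(n, k) for k = 0..n, by the multiplicative rule
--     cn = [1]
--     for k in range(n):
--         cn.append(cn[-1] * (n - k) // (k + 1))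
--     # C(m, n-1) for m = n-1 .. 6n-1, stored at index m-(n-1), by the absorption rule
--     cm = [1]
--     for m in range(n - 1, 6 * n - 1):
--         cm.append(cm[-1] * (m + 1) // (m + 2 - n))
--     return [sum((-1) ** k * cn[k] * cm[s - 6 * k - n] for k in range((s - n) // 6 + 1))
--             for s in range(n, 6 * n + 1)]
-- ===== Notes on version B (the rewrite author's own statement) =====
-- stated objective: alternative
-- what changed: Replaces the (n+1)x(6n+1) convolution DP table by the closed-form inclusion-exclusion formula ways(s) = sum_k (-1)^k C(n,k) C(s-6k-1,n-1), with the two binomial tables built by the multiplicative and absorption recurrences.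
-- outside the precondition, e.g. on numberOfDice(0): A returns 0, B returns 0; on numberOfDice(-1): A raises IndexError, B returns []
import Mathlib
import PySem

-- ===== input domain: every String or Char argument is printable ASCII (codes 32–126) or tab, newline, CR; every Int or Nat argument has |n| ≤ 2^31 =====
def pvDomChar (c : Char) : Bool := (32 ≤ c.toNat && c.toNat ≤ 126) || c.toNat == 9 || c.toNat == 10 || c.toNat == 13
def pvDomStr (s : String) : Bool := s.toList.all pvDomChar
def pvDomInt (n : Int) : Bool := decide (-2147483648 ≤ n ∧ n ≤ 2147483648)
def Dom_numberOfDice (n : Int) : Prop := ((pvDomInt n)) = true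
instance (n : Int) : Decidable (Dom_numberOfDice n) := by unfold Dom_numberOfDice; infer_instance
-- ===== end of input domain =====

-- B replaces A's (n+1)×(6n+1) convolution DP table by the closed-form inclusion–exclusion
-- formula ways(s) = Σ_k (-1)^k C(n,k) C(s-6k-1, n-1), with the two binomial tables built by
-- the multiplicative and absorption recurrences (objective: alternative algorithm).

-- ===== PORT A =====
def numberOfDice (n : Int) : List Int :=
  if n == 0 then []  -- Python returns the int 0 here, not a list; excluded by Pre_
  else
    let dp : List (List Int) :=
      (PySem.List.pyRange 0 (n + 1) 1).map (fun _ => PySem.List.pyRepeat [0] (6 * n + 1))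
    let dp := (PySem.List.pyRange 1 7 1).foldl
      (fun dp i => PySem.List.pySetD dp 1 (PySem.List.pySetD (PySem.List.pyGetD dp 1 []) i 1)) dp
    let dp := (PySem.List.pyRange 2 (n + 1) 1).foldl (fun dp i =>
      (PySem.List.pyRange i (6 * i + 1) 1).foldl (fun dp j =>
        (PySem.List.pyRange 1 7 1).foldl (fun dp k =>
          PySem.List.pySetD dp i (PySem.List.pySetD (PySem.List.pyGetD dp i []) j
            (PySem.List.pyGetD (PySem.List.pyGetD dp i []) j 0
              + PySem.List.pyGetD (PySem.List.pyGetD dp (i - 1) []) (j - k) 0))) dp) dp) dp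
    PySem.List.slice (PySem.List.pyGetD dp (-1) []) (some n) none

-- ===== PORT B =====
def numberOfDice_alt (n : Int) : List Int :=
  if n == 0 then []  -- Python returns the int 0 here, not a list; excluded by Pre_
  else
    -- C(n, k) for k = 0..n, multiplicative rule
    let cn := (PySem.List.pyRange 0 n 1).foldl
      (fun cn k => cn ++ [PySem.Int.floordiv (PySem.List.pyGetD cn (-1) 0 * (n - k)) (k + 1)]) [1]
    -- C(m, n-1) for m = n-1 .. 6n-1 at index m-(n-1), absorption rule
    let cm := (PySem.List.pyRange (n - 1) (6 * n - 1) 1).foldl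
      (fun cm m => cm ++ [PySem.Int.floordiv (PySem.List.pyGetD cm (-1) 0 * (m + 1)) (m + 2 - n)]) [1]
    (PySem.List.pyRange n (6 * n + 1) 1).map (fun s =>
      ((PySem.List.pyRange 0 (PySem.Int.floordiv (s - n) 6 + 1) 1).map (fun k =>
        (-1 : Int) ^ k.toNat * PySem.List.pyGetD cn k 0
          * PySem.List.pyGetD cm (s - 6 * k - n) 0)).sum)

-- ===== PRECONDITION & SPEC =====
-- Pre_ excludes n = 0, where A returns the int 0 (not a list), and n < 0, where A raises IndexError.
def Pre_numberOfDice (n : Int) : Prop := 1 ≤ n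
instance (n : Int) : Decidable (Pre_numberOfDice n) := by unfold Pre_numberOfDice; infer_instance
def pvWitness_numberOfDice : Int := 2
def Spec_numberOfDice (n : Int) (out : List Int) : Prop := out = numberOfDice_alt n
instance (n : Int) (out : List Int) : Decidable (Spec_numberOfDice n out) := by unfold Spec_numberOfDice; infer_instance

-- ===== CLAIM (what is proved, stated in full; the proofs are below) =====
def Claim_equal_numberOfDice : Prop :=
  ∀ (n : Int), Dom_numberOfDice n → Pre_numberOfDice n → Spec_numberOfDice n (numberOfDice n)

-- ===== LEMMAS AND PROOFS =====

-- the number of ways t dice sum to j (0 for j outside [t, 6t])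
def w : ℕ → ℤ → ℤ
  | 0, j => if j = 0 then 1 else 0
  | t + 1, j => w t (j-1) + w t (j-2) + w t (j-3) + w t (j-4) + w t (j-5) + w t (j-6)

def rowOf (t L : ℕ) : List Int := (PySem.List.pyRange 0 L 1).map (w t)

def zeroRow (N : ℕ) : List Int := List.replicate (6*N+1) 0

lemma w_neg (t : ℕ) (j : ℤ) (h : j < 0) : w t j = 0 := by
  induction t generalizing j with
  | zero => simp [w]; omega
  | succ t ih => simp [w, ih _ (by omega : j-1 < 0), ih _ (by omega : j-2 < 0),
      ih _ (by omega : j-3 < 0), ih _ (by omega : j-4 < 0),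
      ih _ (by omega : j-5 < 0), ih _ (by omega : j-6 < 0)]

lemma w_gt (t : ℕ) (j : ℤ) (h : 6*t < j) : w t j = 0 := by
  induction t generalizing j with
  | zero => simp [w]; omega
  | succ t ih =>
    have : ∀ k : ℤ, 1 ≤ k → k ≤ 6 → w t (j - k) = 0 := fun k h1 h2 => ih _ (by push_cast at h ⊢; omega)
    simp [w, this 1 (by norm_num) (by norm_num), this 2 (by norm_num) (by norm_num),
      this 3 (by norm_num) (by norm_num), this 4 (by norm_num) (by norm_num),
      this 5 (by norm_num) (by norm_num), this 6 (by norm_num) (by norm_num)]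

lemma w_lt (t : ℕ) (j : ℤ) (h : j < t) : w t j = 0 := by
  induction t generalizing j with
  | zero => exact w_neg 0 j (by omega)
  | succ t ih =>
    have : ∀ k : ℤ, 1 ≤ k → k ≤ 6 → w t (j - k) = 0 := by
      intro k h1 h2
      rcases lt_or_ge (j - k) t with h' | h'
      · exact ih _ h'
      · exact absurd h (by push_cast; omega)
    simp [w, this 1 (by norm_num) (by norm_num), this 2 (by norm_num) (by norm_num),
      this 3 (by norm_num) (by norm_num), this 4 (by norm_num) (by norm_num),
      this 5 (by norm_num) (by norm_num), this 6 (by norm_num) (by norm_num)]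

-- lengths / entries of rowOf
lemma rowOf_length (t L : ℕ) : (rowOf t L).length = L := by
  simp [rowOf, PySem.List.length_pyRange_one]

lemma rowOf_getElem (t L : ℕ) (m : ℕ) (hm : m < L) :
    (rowOf t L)[m]'(by rw [rowOf_length]; exact hm) = w t m := by
  simp [rowOf, PySem.List.getElem_pyRange_one]

lemma drop_map_pyRange (f : ℤ → ℤ) (a b : ℤ) (d : ℕ) (hd : a + d ≤ b) :
    (((PySem.List.pyRange a b 1).map f).drop d) = (PySem.List.pyRange (a + d) b 1).map f := by
  rw [PySem.List.pyRange_one_append a (a + d) b (by omega) hd, List.map_append]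
  have hl : (((PySem.List.pyRange a (a + d) 1)).map f).length = d := by
    simp [PySem.List.length_pyRange_one]
  exact List.drop_left' hl

-- ===== A-side machinery =====

lemma getD_set_self' (l : List Int) (n : ℕ) (h : n < l.length) (a : Int) :
    (l.set n a).getD n 0 = a := by
  rw [List.getD_eq_getElem _ 0 (by simpa using h)]; simp
lemma getD2_set_self (l : List (List Int)) (n : ℕ) (h : n < l.length) (a : List Int) :
    (l.set n a).getD n [] = a := by
  rw [List.getD_eq_getElem _ [] (by simpa using h)]; simp
lemma getD2_set_ne (l : List (List Int)) (n m : ℕ) (h : m ≠ n) (a : List Int) :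
    (l.set n a).getD m [] = l.getD m [] := by
  simp [List.getD, List.getElem?_set_ne (by omega : n ≠ m)]

lemma innerK (ks : List Int) (dp : List (List Int)) (I J : ℕ)
    (hI : I < dp.length) (hI1 : 1 ≤ I) (hJ : J < (dp.getD I []).length) :
    ks.foldl (fun dp k => PySem.List.pySetD dp (I:ℤ)
      (PySem.List.pySetD (PySem.List.pyGetD dp (I:ℤ) []) (J:ℤ)
       (PySem.List.pyGetD (PySem.List.pyGetD dp (I:ℤ) []) (J:ℤ) 0
         + PySem.List.pyGetD (PySem.List.pyGetD dp ((I:ℤ)-1) []) ((J:ℤ)-k) 0))) dp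
    = dp.set I ((dp.getD I []).set J ((dp.getD I []).getD J 0
        + (ks.map (fun k => PySem.List.pyGetD (dp.getD (I-1) []) ((J:ℤ)-k) 0)).sum)) := by
  have hcast : (I:ℤ) - 1 = ((I-1 : ℕ) : ℤ) := by omega
  induction ks generalizing dp with
  | nil =>
    rw [List.foldl_nil, List.map_nil, List.sum_nil, add_zero,
        List.getD_eq_getElem (dp.getD I []) 0 hJ, List.set_getElem_self,
        List.getD_eq_getElem dp [] hI, List.set_getElem_self]
  | cons k ks ih =>
    rw [List.foldl_cons]
    have hb : PySem.List.pySetD dp (I:ℤ)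
      (PySem.List.pySetD (PySem.List.pyGetD dp (I:ℤ) []) (J:ℤ)
       (PySem.List.pyGetD (PySem.List.pyGetD dp (I:ℤ) []) (J:ℤ) 0
         + PySem.List.pyGetD (PySem.List.pyGetD dp ((I:ℤ)-1) []) ((J:ℤ)-k) 0))
        = dp.set I ((dp.getD I []).set J ((dp.getD I []).getD J 0
            + PySem.List.pyGetD (dp.getD (I-1) []) ((J:ℤ)-k) 0)) := by
      simp [hcast]
    rw [hb]
    rw [ih _ (by simpa using hI) (by rw [getD2_set_self _ _ hI]; simpa using hJ)]
    rw [getD2_set_self _ _ hI, getD2_set_ne _ _ _ (by omega), getD_set_self' _ _ hJ,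
        List.set_set, List.set_set, List.map_cons, List.sum_cons, add_assoc]

lemma term_eq (N I : ℕ) (m k : ℤ) (h2I : 2 ≤ I) (hIN : I ≤ N) (hm : (I:ℤ) ≤ m)
    (hm6 : m ≤ 6*I) (hk1 : 1 ≤ k) (hk6 : k ≤ 6) :
    PySem.List.pyGetD (rowOf (I-1) (6*N+1)) (m-k) 0 = w (I-1) (m-k) := by
  rcases le_or_gt 0 (m - k) with h0 | h0
  · have hlt : (m - k).toNat < 6*N+1 := by omega
    rw [PySem.List.pyGetD_eq_getElem _ _ h0 (by rw [rowOf_length]; omega)]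
    rw [rowOf_getElem (I-1) (6*N+1) (m-k).toNat hlt]
    congr 1
    omega
  · -- negative index wraps to the zero tail of the row
    have hk' : (k - m).toNat ≤ (rowOf (I-1) (6*N+1)).length := by rw [rowOf_length]; omega
    have hneg : m - k = -(((k - m).toNat : ℕ) : ℤ) := by omega
    rw [hneg, PySem.List.pyGetD_neg_natCast _ _ _ (by omega) hk']
    have hlt : 6*N+1 - (k-m).toNat < 6*N+1 := by omega
    have hval : (rowOf (I-1) (6*N+1))[(rowOf (I-1) (6*N+1)).length - (k - m).toNat]'(by rw [rowOf_length]; omega)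
        = w (I-1) ((6*N+1 - (k-m).toNat : ℕ) : ℤ) := by
      have h := rowOf_getElem (I-1) (6*N+1) (6*N+1 - (k-m).toNat) hlt
      simp only [rowOf_length]
      exact h
    rw [hval, w_gt _ _ (by omega), w_neg _ _ (by omega)]

lemma sum6 (N I : ℕ) (m : ℤ) (h2I : 2 ≤ I) (hIN : I ≤ N) (hm : (I:ℤ) ≤ m) (hm6 : m ≤ 6*I) :
    ((PySem.List.pyRange 1 7 1).map
      (fun k => PySem.List.pyGetD (rowOf (I-1) (6*N+1)) (m-k) 0)).sum = w I m := by
  have h17 : PySem.List.pyRange 1 7 1 = [1,2,3,4,5,6] := by decide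
  rw [h17]
  simp only [List.map_cons, List.map_nil, List.sum_cons, List.sum_nil, add_zero]
  rw [term_eq N I m 1 h2I hIN hm hm6 (by norm_num) (by norm_num),
      term_eq N I m 2 h2I hIN hm hm6 (by norm_num) (by norm_num),
      term_eq N I m 3 h2I hIN hm hm6 (by norm_num) (by norm_num),
      term_eq N I m 4 h2I hIN hm hm6 (by norm_num) (by norm_num),
      term_eq N I m 5 h2I hIN hm hm6 (by norm_num) (by norm_num),
      term_eq N I m 6 h2I hIN hm hm6 (by norm_num) (by norm_num)]
  obtain ⟨I', rfl⟩ : ∃ I', I = I'+1 := ⟨I-1, by omega⟩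
  simp only [Nat.add_sub_cancel]
  rw [w]
  ring

def partialRow (I N : ℕ) (m : ℤ) : List Int :=
  (PySem.List.pyRange 0 ((6*N+1 : ℕ) : ℤ) 1).map (fun x => if (I:ℤ) ≤ x ∧ x < m then w I x else 0)

lemma partialRow_length (I N : ℕ) (m : ℤ) : (partialRow I N m).length = 6*N+1 := by
  simp [partialRow, PySem.List.length_pyRange_one]
  omega

lemma partialRow_getElem (I N : ℕ) (m : ℤ) (x : ℕ) (hx : x < 6*N+1) :
    (partialRow I N m)[x]'(by rw [partialRow_length]; exact hx)
      = if (I:ℤ) ≤ (x:ℤ) ∧ (x:ℤ) < m then w I x else 0 := by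
  simp [partialRow, PySem.List.getElem_pyRange_one]

lemma partialRow_base (I N : ℕ) : partialRow I N I = zeroRow N := by
  apply List.ext_getElem
  · rw [partialRow_length]; simp [zeroRow]
  · intro x h1 h2
    rw [partialRow_getElem I N I x (by rwa [partialRow_length] at h1)]
    rw [if_neg (by omega)]
    simp [zeroRow]

lemma partialRow_step (I N : ℕ) (J : ℕ) (hIJ : I ≤ J) :
    (partialRow I N J).set J (0 + w I J) = partialRow I N ((J:ℤ)+1) := by
  apply List.ext_getElem
  · simp [partialRow_length]
  · intro x h1 h2
    have hx : x < 6*N+1 := by simpa [partialRow_length] using h2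
    rw [List.getElem_set]
    rw [partialRow_getElem I N ((J:ℤ)+1) x hx]
    split
    · next h =>
      subst h
      rw [zero_add, if_pos (by constructor <;> [exact_mod_cast hIJ; omega])]
    · next h =>
      rw [partialRow_getElem I N J x hx]
      by_cases hc : (I:ℤ) ≤ (x:ℤ) ∧ (x:ℤ) < J
      · rw [if_pos hc, if_pos ⟨hc.1, by omega⟩]
      · rw [if_neg hc, if_neg (by omega)]

lemma partialRow_full (I N : ℕ) :
    partialRow I N (6*(I:ℤ)+1) = rowOf I (6*N+1) := by
  unfold partialRow rowOf
  apply List.map_congr_left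
  intro x hx
  obtain ⟨hx0, hxM⟩ := PySem.List.mem_pyRange_one.mp hx
  by_cases hc : (I:ℤ) ≤ x ∧ x < 6*(I:ℤ)+1
  · rw [if_pos hc]
  · rw [if_neg hc]
    rcases not_and_or.mp hc with h | h
    · exact (w_lt I x (by omega)).symm
    · exact (w_gt I x (by omega)).symm

lemma innerJ (N I : ℕ) (dp : List (List Int)) (h2I : 2 ≤ I) (hIN : I ≤ N)
    (hlen : dp.length = N+1)
    (hprev : dp.getD (I-1) [] = rowOf (I-1) (6*N+1))
    (hcur : dp.getD I [] = zeroRow N)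
    (d : ℕ) (hd : (I:ℤ) + d ≤ 6*(I:ℤ)+1) :
    (PySem.List.pyRange (I:ℤ) ((I:ℤ)+d) 1).foldl (fun dp j =>
        (PySem.List.pyRange 1 7 1).foldl (fun dp k =>
          PySem.List.pySetD dp (I:ℤ) (PySem.List.pySetD (PySem.List.pyGetD dp (I:ℤ) []) j
            (PySem.List.pyGetD (PySem.List.pyGetD dp (I:ℤ) []) j 0
              + PySem.List.pyGetD (PySem.List.pyGetD dp ((I:ℤ)-1) []) (j - k) 0))) dp) dp
    = dp.set I (partialRow I N ((I:ℤ)+d)) := by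
  have hI : I < dp.length := by omega
  induction d with
  | zero =>
    have hz : (I:ℤ) + ((0:ℕ):ℤ) = (I:ℤ) := by push_cast; ring
    rw [hz, PySem.List.pyRange_one_eq_nil (le_refl _), List.foldl_nil,
        partialRow_base, ← hcur, List.getD_eq_getElem dp [] hI, List.set_getElem_self]
  | succ d ih =>
    have hd' : (I:ℤ) + d ≤ 6*(I:ℤ)+1 := by push_cast at hd ⊢; omega
    have hstep : (I:ℤ) + ((d+1 : ℕ) : ℤ) = ((I:ℤ) + d) + 1 := by push_cast; ring
    rw [hstep, PySem.List.pyRange_one_succ_right (by omega), List.foldl_append, ih hd',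
        List.foldl_cons, List.foldl_nil]
    have hj0 : (I:ℤ) + (d:ℤ) = ((I+d : ℕ) : ℤ) := by push_cast; ring
    rw [hj0]
    set J := I + d with hJdef
    have hJ6 : J ≤ 6*I := by omega
    have hJlen : J < 6*N+1 := by omega
    rw [innerK _ _ I J (by simp [hlen]; omega) (by omega)
        (by rw [getD2_set_self _ _ hI, partialRow_length]; exact hJlen)]
    rw [getD2_set_self _ _ hI]
    simp only [getD2_set_ne dp I (I-1) (by omega) _]
    rw [hprev]
    have hget : (partialRow I N ((J:ℕ):ℤ)).getD J 0 = 0 := by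
      rw [List.getD_eq_getElem _ 0 (by rw [partialRow_length]; exact hJlen),
          partialRow_getElem I N _ J hJlen, if_neg (by omega)]
    rw [hget, sum6 N I ((J:ℕ):ℤ) h2I hIN (by exact_mod_cast (by omega : I ≤ J)) (by exact_mod_cast hJ6)]
    rw [List.set_set, partialRow_step I N J (by omega)]

def dpAt (N : ℕ) (i : ℤ) : List (List Int) :=
  (List.range (N+1)).map (fun (r : ℕ) => if 1 ≤ r ∧ (r:ℤ) < i then rowOf r (6*N+1) else zeroRow N)

lemma dpAt_length (N : ℕ) (i : ℤ) : (dpAt N i).length = N+1 := by simp [dpAt]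

lemma dpAt_getD (N : ℕ) (i : ℤ) (r : ℕ) (hr : r < N+1) :
    (dpAt N i).getD r [] = if 1 ≤ r ∧ (r:ℤ) < i then rowOf r (6*N+1) else zeroRow N := by
  rw [List.getD_eq_getElem _ [] (by rw [dpAt_length]; exact hr)]
  simp [dpAt]

lemma dpAt_set (N I : ℕ) (h1 : 1 ≤ I) :
    (dpAt N (I:ℤ)).set I (rowOf I (6*N+1)) = dpAt N ((I:ℤ)+1) := by
  apply List.ext_getElem
  · simp [dpAt_length]
  · intro r hr1 hr2
    have hr : r < N+1 := by simpa [dpAt_length] using hr2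
    rw [List.getElem_set]
    simp only [dpAt, List.getElem_map, List.getElem_range]
    split
    · next h => subst h; rw [if_pos ⟨h1, by omega⟩]
    · next h =>
      by_cases hc : 1 ≤ r ∧ (r:ℤ) < (I:ℤ)
      · rw [if_pos hc, if_pos ⟨hc.1, by omega⟩]
      · rw [if_neg hc, if_neg (by omega)]

lemma boundary_fold (ks : List Int) (dp : List (List Int)) (h1 : 1 < dp.length) :
    ks.foldl (fun dp i => PySem.List.pySetD dp 1
      (PySem.List.pySetD (PySem.List.pyGetD dp 1 []) i 1)) dp
    = dp.set 1 (ks.foldl (fun row i => PySem.List.pySetD row i 1) (dp.getD 1 [])) := by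
  induction ks generalizing dp with
  | nil =>
    rw [List.foldl_nil, List.foldl_nil, List.getD_eq_getElem dp [] h1, List.set_getElem_self]
  | cons k ks ih =>
    rw [List.foldl_cons, List.foldl_cons]
    have e1 : PySem.List.pyGetD dp 1 [] = dp.getD 1 [] := by
      rw [show (1:ℤ) = ((1:ℕ):ℤ) from rfl, PySem.List.pyGetD_natCast]
    have e2 : PySem.List.pySetD dp 1 (PySem.List.pySetD (PySem.List.pyGetD dp 1 []) k 1)
        = dp.set 1 (PySem.List.pySetD (dp.getD 1 []) k 1) := by
      rw [e1, show (1:ℤ) = ((1:ℕ):ℤ) from rfl, PySem.List.pySetD_natCast]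
    rw [e2, ih _ (by simpa using h1), getD2_set_self _ _ h1, List.set_set]

lemma w_one (x : ℤ) : w 1 x = if 1 ≤ x ∧ x ≤ 6 then 1 else 0 := by
  show w (0+1) x = _
  rw [w]
  simp only [w]
  split_ifs <;> omega

lemma row1_eq (N : ℕ) :
    [(1:ℤ),2,3,4,5,6].foldl (fun row i => PySem.List.pySetD row i 1) (zeroRow N)
    = rowOf 1 (6*N+1) := by
  simp only [List.foldl_cons, List.foldl_nil]
  simp only [PySem.List.pySetD_of_nonneg _ _ (by norm_num : (0:ℤ) ≤ 1),
    PySem.List.pySetD_of_nonneg _ _ (by norm_num : (0:ℤ) ≤ 2),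
    PySem.List.pySetD_of_nonneg _ _ (by norm_num : (0:ℤ) ≤ 3),
    PySem.List.pySetD_of_nonneg _ _ (by norm_num : (0:ℤ) ≤ 4),
    PySem.List.pySetD_of_nonneg _ _ (by norm_num : (0:ℤ) ≤ 5),
    PySem.List.pySetD_of_nonneg _ _ (by norm_num : (0:ℤ) ≤ 6)]
  norm_num
  apply List.ext_getElem
  · simp [zeroRow, rowOf_length]
  · intro x h1 h2
    have hx : x < 6*N+1 := by simpa [rowOf_length] using h2
    rw [rowOf_getElem 1 (6*N+1) x hx, w_one]
    simp only [List.getElem_set, zeroRow, List.getElem_replicate]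
    split_ifs <;> omega

lemma dp1_eq (N : ℕ) (hN : 1 ≤ N) :
    (PySem.List.pyRange 1 7 1).foldl (fun dp i => PySem.List.pySetD dp 1
      (PySem.List.pySetD (PySem.List.pyGetD dp 1 []) i 1)) (List.replicate (N+1) (zeroRow N))
    = dpAt N 2 := by
  have h17 : PySem.List.pyRange 1 7 1 = [1,2,3,4,5,6] := by decide
  rw [h17, boundary_fold _ _ (by simp; omega)]
  have hz : (List.replicate (N+1) (zeroRow N)).getD 1 [] = zeroRow N := by
    rw [List.getD_eq_getElem _ [] (by simp; omega)]
    simp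
  rw [hz, row1_eq N]
  apply List.ext_getElem
  · simp [dpAt_length]
  · intro r hr1 hr2
    have hr : r < N+1 := by simpa using hr1
    rw [List.getElem_set]
    simp only [dpAt, List.getElem_map, List.getElem_range, List.getElem_replicate]
    split
    · next h => subst h; rw [if_pos (by omega)]
    · next h => rw [if_neg (by omega)]

lemma outer_fold (N : ℕ) (d : ℕ) (hd : 2 + d ≤ N + 1) :
    (PySem.List.pyRange 2 (2+(d:ℤ)) 1).foldl (fun dp i =>
      (PySem.List.pyRange i (6*i+1) 1).foldl (fun dp j =>
        (PySem.List.pyRange 1 7 1).foldl (fun dp k =>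
          PySem.List.pySetD dp i (PySem.List.pySetD (PySem.List.pyGetD dp i []) j
            (PySem.List.pyGetD (PySem.List.pyGetD dp i []) j 0
              + PySem.List.pyGetD (PySem.List.pyGetD dp (i - 1) []) (j - k) 0))) dp) dp)
      (dpAt N 2)
    = dpAt N (2+(d:ℤ)) := by
  induction d with
  | zero =>
    rw [show (2:ℤ)+((0:ℕ):ℤ) = 2 by norm_num, PySem.List.pyRange_one_eq_nil (le_refl _),
      List.foldl_nil]
  | succ d ih =>
    have hd' : 2 + d ≤ N + 1 := by omega
    have hstep : (2:ℤ) + ((d+1 : ℕ) : ℤ) = (2 + (d:ℤ)) + 1 := by push_cast; ring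
    rw [hstep, PySem.List.pyRange_one_succ_right (by omega), List.foldl_append, ih hd',
        List.foldl_cons, List.foldl_nil]
    have hi0 : (2:ℤ) + (d:ℤ) = ((2+d : ℕ) : ℤ) := by push_cast; ring
    rw [hi0]
    set I := 2 + d with hIdef
    have h2I : 2 ≤ I := by omega
    have hIN : I ≤ N := by omega
    have h6 : 6*((I:ℕ):ℤ)+1 = ((I:ℕ):ℤ) + ((5*I+1 : ℕ) : ℤ) := by push_cast; ring
    rw [h6]
    rw [innerJ N I (dpAt N (I:ℤ)) h2I hIN (dpAt_length N _)
      (by rw [dpAt_getD N _ (I-1) (by omega), if_pos (by constructor <;> omega)])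
      (by rw [dpAt_getD N _ I (by omega), if_neg (by omega)])
      (5*I+1) (by push_cast; omega)]
    rw [← h6, show 6*((I:ℕ):ℤ)+1 = 6*(I:ℤ)+1 from rfl, partialRow_full I N,
        dpAt_set N I (by omega)]

lemma dp0_eq (N : ℕ) :
    (PySem.List.pyRange 0 ((N:ℤ)+1) 1).map (fun _ => PySem.List.pyRepeat [(0:ℤ)] (6*(N:ℤ)+1))
    = List.replicate (N+1) (zeroRow N) := by
  refine List.eq_replicate_iff.mpr ⟨?_, ?_⟩
  · rw [List.length_map, PySem.List.length_pyRange_one]; omega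
  · intro b hb
    obtain ⟨a, _, rfl⟩ := List.mem_map.mp hb
    rw [PySem.List.pyRepeat_singleton]
    unfold zeroRow
    congr 1

lemma dpLast (N : ℕ) (hN : 1 ≤ N) :
    PySem.List.pyGetD (dpAt N (2+((N-1:ℕ):ℤ))) (-1) [] = rowOf N (6*N+1) := by
  have h := PySem.List.pyGetD_neg_natCast (dpAt N (2+((N-1:ℕ):ℤ))) 1 []
    (by norm_num) (by rw [dpAt_length]; omega)
  rw [show (-1:ℤ) = -((1:ℕ):ℤ) from rfl, h,
      ← List.getD_eq_getElem (dpAt N (2+((N-1:ℕ):ℤ))) [],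
      show (dpAt N (2+((N-1:ℕ):ℤ))).length - 1 = N from by rw [dpAt_length]; omega,
      dpAt_getD N _ N (by omega), if_pos (by constructor <;> omega)]

-- ===== B-side machinery: inclusion–exclusion =====

-- binomial coefficient C(a, b) for an integer top, 0 for a < 0
def c (a : ℤ) (b : ℕ) : ℤ := if 0 ≤ a then (a.toNat.choose b : ℤ) else 0

-- the inclusion–exclusion formula
def f (n : ℕ) (s : ℤ) : ℤ :=
  ∑ k ∈ Finset.range (n+1), (-1:ℤ)^k * (n.choose k : ℤ) * c (s - 6*k - 1) (n-1)

lemma pascal_c (a : ℤ) (b : ℕ) : c a (b+1) = c (a-1) (b+1) + c (a-1) b := by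
  unfold c
  rcases lt_trichotomy a 0 with h | h | h
  · rw [if_neg (by omega), if_neg (by omega), if_neg (by omega)]; ring
  · subst h
    norm_num
  · rw [if_pos (by omega), if_pos (by omega), if_pos (by omega)]
    have ht : a.toNat = (a-1).toNat + 1 := by omega
    rw [ht, Nat.choose_succ_succ]
    push_cast; ring

lemma hockey (a : ℤ) (b : ℕ) :
    c (a-1) b + c (a-2) b + c (a-3) b + c (a-4) b + c (a-5) b + c (a-6) b
      = c a (b+1) - c (a-6) (b+1) := by
  have p1 := pascal_c a b
  have p2 := pascal_c (a-1) b
  have p3 := pascal_c (a-2) b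
  have p4 := pascal_c (a-3) b
  have p5 := pascal_c (a-4) b
  have p6 := pascal_c (a-5) b
  rw [show a-1-1 = a-2 by ring] at p2
  rw [show a-2-1 = a-3 by ring] at p3
  rw [show a-3-1 = a-4 by ring] at p4
  rw [show a-4-1 = a-5 by ring] at p5
  rw [show a-5-1 = a-6 by ring] at p6
  linarith

lemma c_zero (x : ℤ) : c x 0 = if 0 ≤ x then 1 else 0 := by
  unfold c; split_ifs <;> simp

lemma f_one (s : ℤ) : f 1 s = w 1 s := by
  rw [w_one]
  unfold f
  rw [Finset.sum_range_succ, Finset.sum_range_succ, Finset.sum_range_zero]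
  push_cast
  rw [show s - 0 - 1 = s - 1 by ring, show s - 6 - 1 = s - 7 by ring]
  simp only [c_zero]
  norm_num
  split_ifs <;> omega

lemma f_succ (n : ℕ) (hn : 1 ≤ n) (s : ℤ) :
    f (n+1) s = f n (s-1) + f n (s-2) + f n (s-3) + f n (s-4) + f n (s-5) + f n (s-6) := by
  have hb : n - 1 + 1 = n := by omega
  -- RHS as one sum of G1 - G2
  have hR : f n (s-1) + f n (s-2) + f n (s-3) + f n (s-4) + f n (s-5) + f n (s-6)
      = ∑ k ∈ Finset.range (n+1),
          ((-1:ℤ)^k * (n.choose k : ℤ) * c (s - 6*k - 1) n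
           - (-1:ℤ)^k * (n.choose k : ℤ) * c (s - 6*k - 7) n) := by
    unfold f
    rw [← Finset.sum_add_distrib, ← Finset.sum_add_distrib, ← Finset.sum_add_distrib,
        ← Finset.sum_add_distrib, ← Finset.sum_add_distrib]
    apply Finset.sum_congr rfl
    intro k _
    have hh := hockey (s - 6*k - 1) (n-1)
    rw [hb] at hh
    rw [show s - 1 - 6*(k:ℤ) - 1 = s - 6*k - 1 - 1 by ring,
        show s - 2 - 6*(k:ℤ) - 1 = s - 6*k - 1 - 2 by ring,
        show s - 3 - 6*(k:ℤ) - 1 = s - 6*k - 1 - 3 by ring,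
        show s - 4 - 6*(k:ℤ) - 1 = s - 6*k - 1 - 4 by ring,
        show s - 5 - 6*(k:ℤ) - 1 = s - 6*k - 1 - 5 by ring,
        show s - 6 - 6*(k:ℤ) - 1 = s - 6*k - 1 - 6 by ring,
        show s - 6*(k:ℤ) - 7 = s - 6*k - 1 - 6 by ring]
    linear_combination ((-1:ℤ)^k * (n.choose k : ℤ)) * hh
  -- LHS expanded
  have hL : f (n+1) s
      = (∑ k ∈ Finset.range (n+1),
          (-1:ℤ)^(k+1) * ((n.choose k : ℤ) + (n.choose (k+1) : ℤ)) * c (s - 6*k - 7) n)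
        + c (s - 1) n := by
    unfold f
    rw [show n + 1 - 1 = n from rfl, Finset.sum_range_succ']
    congr 1
    · apply Finset.sum_congr rfl
      intro k _
      rw [Nat.choose_succ_succ,
          show s - 6*((k+1:ℕ):ℤ) - 1 = s - 6*(k:ℤ) - 7 by push_cast; ring]
      push_cast [Nat.succ_eq_add_one]
      ring
    · norm_num
  -- the shift identity
  have hshift : ∑ k ∈ Finset.range (n+1), (-1:ℤ)^k * (n.choose k : ℤ) * c (s - 6*k - 1) n
      = (∑ k ∈ Finset.range (n+1), (-1:ℤ)^(k+1) * (n.choose (k+1) : ℤ) * c (s - 6*k - 7) n)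
        + c (s - 1) n := by
    have hT : ∑ k ∈ Finset.range (n+2), (-1:ℤ)^k * (n.choose k : ℤ) * c (s - 6*k - 1) n
        = ∑ k ∈ Finset.range (n+1), (-1:ℤ)^k * (n.choose k : ℤ) * c (s - 6*k - 1) n := by
      rw [Finset.sum_range_succ, Nat.choose_succ_self]
      norm_num
    rw [← hT, Finset.sum_range_succ']
    congr 1
    · apply Finset.sum_congr rfl
      intro k _
      rw [show s - 6*((k+1:ℕ):ℤ) - 1 = s - 6*(k:ℤ) - 7 by push_cast; ring]
    · norm_num
  rw [hR, hL, Finset.sum_sub_distrib]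
  have hsplit : ∑ k ∈ Finset.range (n+1),
      (-1:ℤ)^(k+1) * ((n.choose k : ℤ) + (n.choose (k+1) : ℤ)) * c (s - 6*k - 7) n
    = (∑ k ∈ Finset.range (n+1), (-1:ℤ)^(k+1) * (n.choose k : ℤ) * c (s - 6*k - 7) n)
      + ∑ k ∈ Finset.range (n+1), (-1:ℤ)^(k+1) * (n.choose (k+1) : ℤ) * c (s - 6*k - 7) n := by
    rw [← Finset.sum_add_distrib]
    apply Finset.sum_congr rfl
    intro k _
    ring
  rw [hsplit]
  have hneg : ∑ k ∈ Finset.range (n+1), (-1:ℤ)^(k+1) * (n.choose k : ℤ) * c (s - 6*k - 7) n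
      = - ∑ k ∈ Finset.range (n+1), (-1:ℤ)^k * (n.choose k : ℤ) * c (s - 6*k - 7) n := by
    rw [← Finset.sum_neg_distrib]
    apply Finset.sum_congr rfl
    intro k _
    ring
  linarith [hshift, hneg]

lemma f_eq_w (n : ℕ) (hn : 1 ≤ n) : ∀ s : ℤ, f n s = w n s := by
  induction n with
  | zero => omega
  | succ m ih =>
    by_cases hm : m = 0
    · subst hm; exact f_one
    · intro s
      have hm1 : 1 ≤ m := by omega
      rw [f_succ m hm1 s, ih hm1 (s-1), ih hm1 (s-2), ih hm1 (s-3), ih hm1 (s-4),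
          ih hm1 (s-5), ih hm1 (s-6), w]

-- the cn table: C(N, k) for k = 0..N
lemma cn_fold (N M : ℕ) (hM : M ≤ N) :
    (PySem.List.pyRange 0 (M:ℤ) 1).foldl
      (fun cn k => cn ++ [PySem.Int.floordiv (PySem.List.pyGetD cn (-1) 0 * ((N:ℤ) - k)) (k + 1)]) [1]
    = (List.range (M+1)).map (fun k => (N.choose k : ℤ)) := by
  induction M with
  | zero =>
    rw [show ((0:ℕ):ℤ) = 0 from rfl, PySem.List.pyRange_one_eq_nil (le_refl _), List.foldl_nil]
    simp [List.range_succ]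
  | succ M ih =>
    have hM' : M ≤ N := by omega
    rw [show ((M+1:ℕ):ℤ) = (M:ℤ) + 1 by push_cast; ring,
        PySem.List.pyRange_one_succ_right (by positivity), List.foldl_append, ih hM',
        List.foldl_cons, List.foldl_nil]
    have hlast : PySem.List.pyGetD ((List.range (M+1)).map (fun k => (N.choose k : ℤ))) (-1) 0
        = (N.choose M : ℤ) := by
      rw [List.range_succ, List.map_append]
      exact PySem.List.pyGetD_neg_one_append_singleton _ _ _
    rw [hlast]
    have hsub : (N:ℤ) - (M:ℤ) = ((N - M : ℕ) : ℤ) := by omega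
    have hdiv : PySem.Int.floordiv ((N.choose M : ℤ) * ((N:ℤ) - (M:ℤ))) ((M:ℤ) + 1)
        = (N.choose (M+1) : ℤ) := by
      rw [hsub, show ((M:ℤ) + 1) = ((M+1 : ℕ) : ℤ) by push_cast; ring,
          show (N.choose M : ℤ) * ((N - M : ℕ) : ℤ) = ((N.choose M * (N - M) : ℕ) : ℤ) by push_cast; ring,
          PySem.Int.floordiv_natCast]
      congr 1
      rw [← Nat.choose_succ_right_eq]
      exact Nat.mul_div_cancel _ (by omega)
    rw [hdiv, show List.range (M+1+1) = List.range (M+1) ++ [M+1] from List.range_succ,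
        List.map_append]
    rfl

-- the cm table: C(N-1+i, N-1) for i = 0..M
lemma cm_fold (N M : ℕ) (hN : 1 ≤ N) :
    (PySem.List.pyRange ((N:ℤ)-1) ((N:ℤ)-1+(M:ℤ)) 1).foldl
      (fun cm m => cm ++ [PySem.Int.floordiv (PySem.List.pyGetD cm (-1) 0 * (m + 1)) (m + 2 - (N:ℤ))]) [1]
    = (List.range (M+1)).map (fun i => (((N-1)+i).choose (N-1) : ℤ)) := by
  induction M with
  | zero =>
    rw [show (N:ℤ)-1+((0:ℕ):ℤ) = (N:ℤ)-1 by push_cast; ring,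
        PySem.List.pyRange_one_eq_nil (le_refl _), List.foldl_nil]
    simp [List.range_succ, Nat.choose_self]
  | succ M ih =>
    rw [show (N:ℤ)-1+((M+1:ℕ):ℤ) = ((N:ℤ)-1+(M:ℤ)) + 1 by push_cast; ring,
        PySem.List.pyRange_one_succ_right (by omega), List.foldl_append, ih,
        List.foldl_cons, List.foldl_nil]
    have hlast : PySem.List.pyGetD ((List.range (M+1)).map (fun i => (((N-1)+i).choose (N-1) : ℤ))) (-1) 0
        = ((((N-1)+M).choose (N-1)) : ℤ) := by
      rw [List.range_succ, List.map_append]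
      exact PySem.List.pyGetD_neg_one_append_singleton _ _ _
    rw [hlast]
    have hm' : (N:ℤ)-1+(M:ℤ)+1 = (((N-1)+M+1 : ℕ) : ℤ) := by push_cast [Nat.cast_sub hN]; ring
    have hd' : (N:ℤ)-1+(M:ℤ)+2-(N:ℤ) = ((M+1 : ℕ) : ℤ) := by push_cast [Nat.cast_add]; ring
    have hdiv : PySem.Int.floordiv (((((N-1)+M).choose (N-1)) : ℤ) * ((N:ℤ)-1+(M:ℤ)+1)) ((N:ℤ)-1+(M:ℤ)+2-(N:ℤ))
        = ((((N-1)+(M+1)).choose (N-1)) : ℤ) := by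
      rw [hm', hd',
          show ((((N-1)+M).choose (N-1)) : ℤ) * (((N-1)+M+1 : ℕ) : ℤ)
              = ((((N-1)+M).choose (N-1) * ((N-1)+M+1) : ℕ) : ℤ) by push_cast; ring,
          PySem.Int.floordiv_natCast]
      congr 1
      set m' := (N-1)+M with hm'def
      set r := N-1 with hrdef
      have hrm : r ≤ m' := by omega
      -- C(m'+1, r) * (M+1) = C(m', r) * (m'+1), with m'+1-r = M+1
      have key : (m'+1).choose r * (M+1) = m'.choose r * (m'+1) := by
        have h1 : (m'+1).choose r = (m'+1).choose (m'+1-r) := (Nat.choose_symm (by omega)).symm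
        have h2 := Nat.add_one_mul_choose_eq m' (m'-r)
        have h3 : m'.choose (m'-r) = m'.choose r := Nat.choose_symm hrm
        have h4 : m'+1-r = M+1 := by omega
        have h5 : m'-r+1 = M+1 := by omega
        rw [h1, h4]
        rw [h3, h5] at h2
        rw [← h2, mul_comm]
      have : ((N-1)+(M+1)) = m'+1 := by omega
      rw [this, ← key, Nat.mul_div_cancel _ (by omega)]
    rw [hdiv, show List.range (M+1+1) = List.range (M+1) ++ [M+1] from List.range_succ,
        List.map_append]
    rfl

-- list-sum over pyRange 0 m as a Finset sum
lemma sum_map_pyRange_zero (g : ℤ → ℤ) (m : ℕ) :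
    ((PySem.List.pyRange 0 (m:ℤ) 1).map g).sum = ∑ k ∈ Finset.range m, g k := by
  induction m with
  | zero => simp [PySem.List.pyRange_one_eq_nil (le_refl (0:ℤ))]
  | succ m ih =>
    rw [show ((m+1:ℕ):ℤ) = (m:ℤ)+1 by push_cast; ring,
        PySem.List.pyRange_one_succ_right (by positivity), List.map_append, List.sum_append,
        ih, Finset.sum_range_succ]
    simp

lemma c_eq_choose (a : ℤ) (b : ℕ) (h : 0 ≤ a) : c a b = (a.toNat.choose b : ℤ) := by
  unfold c; rw [if_pos h]

-- the inner sum of B equals w N s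
lemma inner_eq (N : ℕ) (hN : 1 ≤ N) (s : ℤ) (hs1 : (N:ℤ) ≤ s) (hs2 : s ≤ 6*(N:ℤ)) :
    ((PySem.List.pyRange 0 (PySem.Int.floordiv (s - N) 6 + 1) 1).map (fun k =>
      (-1 : ℤ) ^ k.toNat * PySem.List.pyGetD ((List.range (N+1)).map (fun k => (N.choose k : ℤ))) k 0
        * PySem.List.pyGetD ((List.range (5*N+1)).map (fun i => (((N-1)+i).choose (N-1) : ℤ))) (s - 6*k - N) 0)).sum
    = w N s := by
  set M := (s - N).toNat / 6 with hMdef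
  have hfl : PySem.Int.floordiv (s - N) 6 + 1 = ((M+1 : ℕ) : ℤ) := by
    rw [show s - (N:ℤ) = (((s-N).toNat : ℕ) : ℤ) by omega,
        show (6:ℤ) = ((6:ℕ):ℤ) from rfl, PySem.Int.floordiv_natCast]
    push_cast; omega
  have hMN : M ≤ N := by omega
  rw [hfl, sum_map_pyRange_zero]
  have hterm : ∀ k ∈ Finset.range (M+1),
      (-1 : ℤ) ^ (k:ℤ).toNat * PySem.List.pyGetD ((List.range (N+1)).map (fun k => (N.choose k : ℤ))) (k:ℤ) 0
        * PySem.List.pyGetD ((List.range (5*N+1)).map (fun i => (((N-1)+i).choose (N-1) : ℤ))) (s - 6*(k:ℤ) - N) 0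
      = (-1:ℤ)^k * (N.choose k : ℤ) * c (s - 6*k - 1) (N-1) := by
    intro k hk
    have hkM : k ≤ M := by simpa [Nat.lt_succ_iff] using Finset.mem_range.mp hk
    have h1 : ((k:ℤ)).toNat = k := by omega
    have hcn : PySem.List.pyGetD ((List.range (N+1)).map (fun k => (N.choose k : ℤ))) (k:ℤ) 0
        = (N.choose k : ℤ) := by
      rw [PySem.List.pyGetD_natCast, List.getD_eq_getElem _ 0 (by simp; omega)]
      simp
    have hi0 : 0 ≤ s - 6*(k:ℤ) - N := by omega
    have hidx : s - 6*(k:ℤ) - N = (((s - 6*(k:ℤ) - N).toNat : ℕ) : ℤ) := by omega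
    set i := (s - 6*(k:ℤ) - N).toNat with hidef
    have hiN : i ≤ 5*N := by omega
    have hcm : PySem.List.pyGetD ((List.range (5*N+1)).map (fun i => (((N-1)+i).choose (N-1) : ℤ))) (s - 6*(k:ℤ) - N) 0
        = ((((N-1)+i).choose (N-1)) : ℤ) := by
      rw [hidx, PySem.List.pyGetD_natCast, List.getD_eq_getElem _ 0 (by simp; omega)]
      simp
    have hc : c (s - 6*k - 1) (N-1) = ((((N-1)+i).choose (N-1)) : ℤ) := by
      rw [c_eq_choose _ _ (by omega)]
      congr 2
      omega
    rw [h1, hcn, hcm, hc]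
  rw [Finset.sum_congr rfl hterm]
  have hext : ∑ k ∈ Finset.range (M+1), (-1:ℤ)^k * (N.choose k : ℤ) * c (s - 6*k - 1) (N-1)
      = ∑ k ∈ Finset.range (N+1), (-1:ℤ)^k * (N.choose k : ℤ) * c (s - 6*k - 1) (N-1) := by
    have hsub : Finset.range (M+1) ⊆ Finset.range (N+1) := fun x hx => Finset.mem_range.mpr (lt_of_lt_of_le (Finset.mem_range.mp hx) (Nat.add_le_add_right hMN 1))
    apply Finset.sum_subset hsub
    intro k _ hk
    have hkM : M < k := by
      have := Finset.mem_range.not.mp hk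
      omega
    have h6M : 6 * M ≤ (s - (N:ℤ)).toNat := by omega
    have hz : c (s - 6*k - 1) (N-1) = 0 := by
      unfold c
      split_ifs with h
      · rw [Nat.choose_eq_zero_of_lt (by omega : (s - 6*(k:ℤ) - 1).toNat < N-1)]
        simp
      · rfl
    rw [hz]; ring
  rw [hext, ← f, f_eq_w N hN s]

-- ===== VERDICT (by name: the statement is the Claim_ definition above) =====
theorem numberOfDice_spec : Claim_equal_numberOfDice := by
  intro n _ hpre
  have hpre' : 1 ≤ n := hpre
  obtain ⟨N, rfl⟩ : ∃ N : ℕ, n = (N:ℤ) := ⟨n.toNat, by omega⟩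
  have hN : 1 ≤ N := by exact_mod_cast hpre'
  unfold Spec_numberOfDice numberOfDice numberOfDice_alt
  have hg : (((N:ℤ)) == 0) = false := by simp; omega
  simp only [hg, Bool.false_eq_true, if_false]
  -- A side
  rw [dp0_eq N, dp1_eq N hN,
      show ((N:ℤ)+1) = 2 + ((N-1 : ℕ):ℤ) by omega,
      outer_fold N (N-1) (by omega), dpLast N hN]
  -- B side
  rw [cn_fold N N (le_refl N)]
  rw [show 6*(N:ℤ) - 1 = (N:ℤ)-1+((5*N:ℕ):ℤ) by push_cast; ring,
      cm_fold N (5*N) hN]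
  -- both sides are the list of w N s for s = N .. 6N
  rw [rowOf, PySem.List.slice_from _ (by positivity),
      show ((N:ℤ)).toNat = N from by omega,
      drop_map_pyRange (w N) 0 ((6*N+1 : ℕ) : ℤ) N (by push_cast; omega), zero_add]
  have hb : ((6*N+1 : ℕ) : ℤ) = 6*(N:ℤ)+1 := by push_cast; ring
  rw [hb]
  apply (List.map_congr_left ?_).symm
  intro s hs
  obtain ⟨hs1, hs2⟩ := PySem.List.mem_pyRange_one.mp hs
  exact inner_eq N hN s hs1 (by omega)
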